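-- pv_equiv track=rewrite | github.com/sbacchio/QuaHoG | utils/h5-to-txt.py | momenta
-- ===== SOURCE A (Python) =====
-- def momenta(max_qsq):
--     moms = []
--     for pz in range(-max_qsq, max_qsq+1):
--         for py in range(-max_qsq, max_qsq+1):
--             for px in range(-max_qsq, max_qsq+1):
--                 qsq = px**2+py**2+pz**2
--                 if qsq <= max_qsq:
--                     moms.append([qsq, px, py, pz])
--     for i in range(len(moms)):
--         for j in range(i, len(moms)):
--             if moms[j][0] <= moms[i][0]:
--                 swap = moms[i][:]
--                 moms[i][:] = moms[j][:]
--                 moms[j][:] = swap[:]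
--     return moms
-- ===== SOURCE B (Python) =====
-- def momenta(max_qsq):
--     # Bucket (counting-sort) version: group momenta by qsq shell and emit
--     # shells in increasing qsq; the descending component loops give the
--     # same within-shell order as A.
--     if max_qsq < 0:
--         return []
--     r = 0
--     while (r + 1) ** 2 <= max_qsq:
--         r += 1
--     shells = {}
--     for pz in range(r, -r - 1, -1):
--         for py in range(r, -r - 1, -1):
--             for px in range(r, -r - 1, -1):
--                 qsq = px ** 2 + py ** 2 + pz ** 2
--                 if qsq <= max_qsq:
--                     if qsq in shells:
--                         shells[qsq].append([qsq, px, py, pz])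
--                     else:
--                         shells[qsq] = [[qsq, px, py, pz]]
--     out = []
--     for q in range(max_qsq + 1):
--         if q in shells:
--             out.extend(shells[q])
--     return out
-- ===== Notes on version B (the rewrite author's own statement) =====
-- stated objective: faster
-- what changed: Generation bounds tightened from [-max_qsq,max_qsq]^3 to [-isqrt(max_qsq),isqrt(max_qsq)]^3 and the quadratic selection-sort pass replaced by bucketing momenta into qsq shells (a counting sort), emitting shells in increasing qsq; descending component loops reproduce A's within-shell order.
import Mathlib
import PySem

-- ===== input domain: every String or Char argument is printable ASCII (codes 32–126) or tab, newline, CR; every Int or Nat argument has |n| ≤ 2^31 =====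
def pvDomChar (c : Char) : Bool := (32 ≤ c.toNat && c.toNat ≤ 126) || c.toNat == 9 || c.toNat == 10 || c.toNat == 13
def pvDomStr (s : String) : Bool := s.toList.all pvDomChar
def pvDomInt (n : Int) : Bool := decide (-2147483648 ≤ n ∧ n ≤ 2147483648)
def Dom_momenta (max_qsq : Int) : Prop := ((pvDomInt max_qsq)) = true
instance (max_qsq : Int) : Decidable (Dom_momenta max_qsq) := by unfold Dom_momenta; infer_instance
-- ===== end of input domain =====

-- B replaces A's O(max_qsq^3) generation cube and quadratic selection-style sort
-- by generation over the tight isqrt cube bucketed into qsq shells (counting sort).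

-- ===== PORT A =====
-- moms[j][0]: every element is the 4-list [qsq,px,py,pz], so index 0 is always
-- in range and the `.getD 0` default is never used.
def pvQKey (m : List Int) : Int := (PySem.List.pyGet? m 0).getD 0

-- the three slice assignments copy list contents; no inner list is aliased, so
-- this is exactly a swap of the entries at i and j
def pvSwap (ms : List (List Int)) (i j : Nat) : List (List Int) :=
  let swap := ms.getD i []
  let ms1 := ms.set i (ms.getD j [])
  ms1.set j swap

def momentaGen (max_qsq : Int) : List (List Int) :=
  (PySem.List.pyRange (-max_qsq) (max_qsq + 1) 1).foldl (fun acc pz =>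
    (PySem.List.pyRange (-max_qsq) (max_qsq + 1) 1).foldl (fun acc py =>
      (PySem.List.pyRange (-max_qsq) (max_qsq + 1) 1).foldl (fun acc px =>
        let qsq := px ^ 2 + py ^ 2 + pz ^ 2
        if qsq ≤ max_qsq then acc ++ [[qsq, px, py, pz]] else acc) acc) acc) []

-- the double index loop; len(moms) is constant (swapping preserves length),
-- indices of range(len(moms)) are naturals, element access is List.getD (in range)
def momentaSortPass (ms0 : List (List Int)) : List (List Int) :=
  (List.range ms0.length).foldl (fun ms i =>
    (List.range' i (ms0.length - i)).foldl (fun ms j =>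
      if pvQKey (ms.getD j []) ≤ pvQKey (ms.getD i []) then pvSwap ms i j else ms) ms) ms0

def momenta (max_qsq : Int) : List (List Int) :=
  momentaSortPass (momentaGen max_qsq)

-- ===== PORT B =====
-- B's while loop; fuel max_qsq.toNat + 1 bounds its iteration count
def pvIsqrtLoop (n r : Int) : Nat → Int
  | 0 => r
  | fuel + 1 => if (r + 1) ^ 2 ≤ n then pvIsqrtLoop n (r + 1) fuel else r

def momenta_alt (max_qsq : Int) : List (List Int) :=
  if max_qsq < 0 then []
  else
    let r := pvIsqrtLoop max_qsq 0 (max_qsq.toNat + 1)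
    let shells : PySem.Dict Int (List (List Int)) :=
      (PySem.List.pyRange r (-r - 1) (-1)).foldl (fun d pz =>
        (PySem.List.pyRange r (-r - 1) (-1)).foldl (fun d py =>
          (PySem.List.pyRange r (-r - 1) (-1)).foldl (fun d px =>
            let qsq := px ^ 2 + py ^ 2 + pz ^ 2
            if qsq ≤ max_qsq then
              if d.contains qsq then d.modify qsq [] (· ++ [[qsq, px, py, pz]])
              else d.insert qsq [[qsq, px, py, pz]]
            else d) d) d) PySem.Dict.empty
    (PySem.List.pyRange 0 (max_qsq + 1) 1).foldl (fun out q =>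
      if shells.contains q then out ++ shells.getD q [] else out) []

-- ===== PRECONDITION & SPEC =====
def Spec_momenta (max_qsq : Int) (out : List (List Int)) : Prop := out = momenta_alt max_qsq
instance (max_qsq : Int) (out : List (List Int)) : Decidable (Spec_momenta max_qsq out) := by unfold Spec_momenta; infer_instance

-- ===== CLAIM (what is proved, stated in full; the proofs are below) =====
def Claim_equal_momenta : Prop := ∀ (max_qsq : Int), Dom_momenta max_qsq → Spec_momenta max_qsq (momenta max_qsq)

-- ===== LEMMAS AND PROOFS =====

-- ---- proof-side functional model of A's inner/outer index loops ----

-- one inner loop of A's pass: scan the suffix with a running champion; the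
-- element deposited at each qualifying j is the previous champion
def pvScan (x : List Int) : List (List Int) → (List Int) × List (List Int)
  | [] => (x, [])
  | y :: ys =>
    if pvQKey y ≤ pvQKey x then
      ((pvScan y ys).1, x :: (pvScan y ys).2)
    else
      ((pvScan x ys).1, y :: (pvScan x ys).2)

def pvPass : Nat → List (List Int) → List (List Int)
  | 0, _ => []
  | _ + 1, [] => []
  | n + 1, x :: xs => (pvScan x xs).1 :: pvPass n (pvScan x xs).2

def pvR (m : Int) : Int := pvIsqrtLoop m 0 (m.toNat + 1)

def pvMk (px py pz : Int) : Int × Int × Int := (px, py, pz)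
def pvQ (t : Int × Int × Int) : Int := t.1 ^ 2 + t.2.1 ^ 2 + t.2.2 ^ 2
def pvElem (t : Int × Int × Int) : List Int := [pvQ t, t.1, t.2.1, t.2.2]

def pvTriples (L : List Int) : List (Int × Int × Int) :=
  L.flatMap fun pz => L.flatMap fun py => L.map fun px => pvMk px py pz

def pvCanon (L : List Int) (m : Int) : List (List Int) :=
  ((pvTriples L).filter (fun t => decide (pvQ t ≤ m))).map pvElem

-- ---- basic list index/set helpers ----

theorem pvGetD_append_cons (a b : List (List Int)) (x : List Int) :
    (a ++ x :: b).getD a.length [] = x := by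
  induction a with
  | nil => rfl
  | cons h t ih => simpa using ih

theorem pvSet_append_cons (a b : List (List Int)) (x v : List Int) :
    (a ++ x :: b).set a.length v = a ++ v :: b := by
  induction a with
  | nil => rfl
  | cons h t ih => simpa using ih

theorem pvSwap_self (a b : List (List Int)) (x : List Int) :
    pvSwap (a ++ x :: b) a.length a.length = a ++ x :: b := by
  simp [pvSwap, pvGetD_append_cons, pvSet_append_cons]

theorem pvSwap_spec (a b c : List (List Int)) (x y : List Int) :
    pvSwap (a ++ x :: (b ++ y :: c)) a.length (a.length + 1 + b.length)
      = a ++ y :: (b ++ x :: c) := by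
  have hlen : (a ++ x :: b).length = a.length + 1 + b.length := by simp; omega
  have hlen2 : (a ++ y :: b).length = a.length + 1 + b.length := by simp; omega
  have hg : (a ++ x :: (b ++ y :: c)).getD (a.length + 1 + b.length) [] = y := by
    rw [show a ++ x :: (b ++ y :: c) = (a ++ x :: b) ++ y :: c by simp, ← hlen,
      pvGetD_append_cons]
  have hs : (a ++ y :: (b ++ y :: c)).set (a.length + 1 + b.length) x
      = a ++ y :: (b ++ x :: c) := by
    rw [show a ++ y :: (b ++ y :: c) = (a ++ y :: b) ++ y :: c by simp, ← hlen2,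
      pvSet_append_cons]
    simp
  simp only [pvSwap, pvGetD_append_cons, hg, pvSet_append_cons, hs]

-- ---- pvScan facts ----

theorem pvScan_len (ys : List (List Int)) (x : List Int) :
    (pvScan x ys).2.length = ys.length := by
  induction ys generalizing x with
  | nil => rfl
  | cons y ys ih => by_cases h : pvQKey y ≤ pvQKey x <;> simp [pvScan, h, ih]

theorem pvScan_fst_mem (ys : List (List Int)) (x : List Int) :
    (pvScan x ys).1 ∈ x :: ys := by
  induction ys generalizing x with
  | nil => simp [pvScan]
  | cons y ys ih =>
    by_cases h : pvQKey y ≤ pvQKey x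
    · have h2 := List.mem_cons.mp (ih y)
      simp only [pvScan, h, ite_true, List.mem_cons]
      tauto
    · have h2 := List.mem_cons.mp (ih x)
      simp only [pvScan, h, ite_false, List.mem_cons]
      tauto

theorem pvScan_snd_mem (ys : List (List Int)) (x : List Int) :
    ∀ a ∈ (pvScan x ys).2, a ∈ x :: ys := by
  induction ys generalizing x with
  | nil => simp [pvScan]
  | cons y ys ih =>
    intro a ha
    by_cases h : pvQKey y ≤ pvQKey x
    · simp only [pvScan, h, ite_true, List.mem_cons] at ha
      rcases ha with rfl | ha
      · simp
      · have := List.mem_cons.mp (ih y a ha)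
        simp only [List.mem_cons]; tauto
    · simp only [pvScan, h, ite_false, List.mem_cons] at ha
      rcases ha with rfl | ha
      · simp
      · have := List.mem_cons.mp (ih x a ha)
        simp only [List.mem_cons]; tauto

theorem pvScan_min (ys : List (List Int)) :
    ∀ (x : List Int), ∀ a ∈ x :: ys, pvQKey (pvScan x ys).1 ≤ pvQKey a := by
  induction ys with
  | nil => intro x a ha; rw [List.mem_singleton] at ha; subst ha; simp [pvScan]
  | cons y ys ih =>
    intro x a ha
    by_cases h : pvQKey y ≤ pvQKey x
    · simp only [pvScan, h, ite_true]
      rcases List.mem_cons.mp ha with rfl | ha2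
      · exact le_trans (ih y y (by simp)) h
      · exact ih y a ha2
    · simp only [pvScan, h, ite_false]
      rcases List.mem_cons.mp ha with rfl | ha2
      · exact ih a a (by simp)
      · rcases List.mem_cons.mp ha2 with rfl | ha3
        · exact le_trans (ih x x (by simp)) (not_le.mp h).le
        · exact ih x a (List.mem_cons_of_mem x ha3)

theorem pvScan_filter (k : Int) (ys : List (List Int)) : ∀ (x : List Int),
    (x :: ys).filter (fun a => pvQKey a == k) =
      (if k = pvQKey (pvScan x ys).1
       then (pvScan x ys).2.filter (fun a => pvQKey a == k) ++ [(pvScan x ys).1]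
       else (pvScan x ys).2.filter (fun a => pvQKey a == k)) := by
  induction ys with
  | nil =>
    intro x
    by_cases h : k = pvQKey x
    · simp [pvScan, List.filter_cons, h, if_pos]
    · simp [pvScan, List.filter_cons, h, Ne.symm h]
  | cons y ys ih =>
    intro x
    by_cases h : pvQKey y ≤ pvQKey x
    · have ihy := ih y
      simp only [pvScan, h, ite_true]
      rw [show ((x :: y :: ys).filter (fun a => pvQKey a == k))
            = (if pvQKey x == k then x :: ((y :: ys).filter (fun a => pvQKey a == k))
               else (y :: ys).filter (fun a => pvQKey a == k)) from List.filter_cons,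
        ihy]
      rw [List.filter_cons]
      split_ifs <;> simp
    · have ihx := ih x
      have hlt : pvQKey x < pvQKey y := not_le.mp h
      simp only [pvScan, h, ite_false]
      by_cases hy : pvQKey y = k
      · have hxk : (pvQKey x == k) = false := by simp; omega
        have hyk : (pvQKey y == k) = true := by simp [hy]
        have hck : k ≠ pvQKey (pvScan x ys).1 := by
          have := pvScan_min ys x x (by simp)
          omega
        simp only [List.filter_cons, hxk, hyk, Bool.false_eq_true, ite_false, ite_true,
          if_neg hck] at ihx ⊢
        rw [ihx]
      · have hyk : (pvQKey y == k) = false := by simp [hy]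
        simp only [List.filter_cons, hyk, Bool.false_eq_true, ite_false] at ihx ⊢
        exact ihx

-- ---- A's index pass equals pvPass ----

theorem pvInnerAux (unproc : List (List Int)) :
    ∀ (proc done : List (List Int)) (champ : List Int),
    (List.range' (done.length + 1 + proc.length) unproc.length).foldl
      (fun ms j => if pvQKey (ms.getD j []) ≤ pvQKey (ms.getD done.length []) then pvSwap ms done.length j else ms)
      (done ++ champ :: (proc ++ unproc))
    = done ++ (pvScan champ unproc).1 :: (proc ++ (pvScan champ unproc).2) := by
  induction unproc with
  | nil => intro proc done champ; simp [pvScan]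
  | cons y u ih =>
    intro proc done champ
    simp only [List.length_cons]
    rw [List.range'_succ, List.foldl_cons]
    have hgi : (done ++ champ :: (proc ++ y :: u)).getD done.length [] = champ :=
      pvGetD_append_cons _ _ _
    have hgj : (done ++ champ :: (proc ++ y :: u)).getD (done.length + 1 + proc.length) [] = y := by
      rw [show done ++ champ :: (proc ++ y :: u) = (done ++ champ :: proc) ++ y :: u by simp,
        show done.length + 1 + proc.length = (done ++ champ :: proc).length by simp; omega,
        pvGetD_append_cons]
    rw [hgi, hgj]
    by_cases h : pvQKey y ≤ pvQKey champ
    · rw [if_pos h, pvSwap_spec]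
      have hstep := ih (proc ++ [champ]) done y
      rw [show done ++ y :: (proc ++ [champ] ++ u)
            = done ++ y :: (proc ++ champ :: u) by simp] at hstep
      rw [show done.length + 1 + (proc ++ [champ]).length
            = done.length + 1 + proc.length + 1 by simp; omega] at hstep
      rw [hstep]
      simp only [pvScan, h, ite_true]
      simp
    · rw [if_neg h]
      have hstep := ih (proc ++ [y]) done champ
      rw [show done ++ champ :: (proc ++ [y] ++ u) = done ++ champ :: (proc ++ y :: u) by simp]
        at hstep
      rw [show done.length + 1 + (proc ++ [y]).length
            = done.length + 1 + proc.length + 1 by simp; omega] at hstep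
      rw [hstep]
      simp only [pvScan, h, ite_false]
      simp

theorem pvOuterAux (n : Nat) : ∀ (len : Nat) (rest done : List (List Int)),
    rest.length = len → done.length + len = n →
    (List.range' done.length len).foldl
      (fun ms i => (List.range' i (n - i)).foldl
        (fun ms j => if pvQKey (ms.getD j []) ≤ pvQKey (ms.getD i []) then pvSwap ms i j else ms) ms)
      (done ++ rest)
    = done ++ pvPass len rest := by
  intro len
  induction len with
  | zero =>
    intro rest done hr hn
    rw [List.length_eq_zero_iff] at hr
    subst hr
    simp [pvPass]
  | succ m ih =>
    intro rest done hr hn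
    match rest, hr with
    | x :: xs, hr =>
      have hxs : xs.length = m := by simpa using hr
      rw [List.range'_succ, List.foldl_cons]
      have hni : n - done.length = m + 1 := by omega
      rw [hni, List.range'_succ, List.foldl_cons]
      have hgi : (done ++ x :: xs).getD done.length [] = x := pvGetD_append_cons _ _ _
      rw [hgi, if_pos le_rfl, pvSwap_self]
      have hinner := pvInnerAux xs [] done x
      simp only [List.length_nil, Nat.add_zero, List.nil_append] at hinner
      rw [hxs] at hinner
      rw [hinner]
      have hzs : (pvScan x xs).2.length = m := by rw [pvScan_len]; exact hxs
      have hrec := ih (pvScan x xs).2 (done ++ [(pvScan x xs).1]) hzs (by simp; omega)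
      simp only [List.length_append, List.length_cons, List.length_nil] at hrec
      rw [show done ++ [(pvScan x xs).1] ++ (pvScan x xs).2
            = done ++ (pvScan x xs).1 :: (pvScan x xs).2 by simp] at hrec
      rw [show done.length + (1 + 0) = done.length + 1 by omega] at hrec
      rw [hrec]
      simp [pvPass, hzs, hxs]

theorem momentaSortPass_eq (ms : List (List Int)) :
    momentaSortPass ms = pvPass ms.length ms := by
  have h := pvOuterAux ms.length ms.length ms [] rfl (by simp)
  simpa [momentaSortPass, List.range_eq_range'] using h

-- ---- the pass is bucket collection ----

theorem pvPass_eq_flatMap : ∀ (n : Nat) (l : List (List Int)) (ks : List Int), l.length = n →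
    ks.Pairwise (· < ·) → (∀ a ∈ l, pvQKey a ∈ ks) →
    pvPass l.length l = ks.flatMap (fun k => l.reverse.filter (fun a => pvQKey a == k)) := by
  intro n
  induction n with
  | zero =>
    intro l ks hl _ _
    rw [List.length_eq_zero_iff] at hl; subst hl
    simp [pvPass]
  | succ m ih =>
    intro l ks hl hks hmem
    match l, hl with
    | x :: xs, hl =>
      have hxs : xs.length = m := by simpa using hl
      have hcmem : (pvScan x xs).1 ∈ x :: xs := pvScan_fst_mem xs x
      have hkc : pvQKey (pvScan x xs).1 ∈ ks := hmem _ hcmem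
      obtain ⟨ks1, ks2, hsplit⟩ := List.append_of_mem hkc
      have hpw := hsplit ▸ hks
      rw [List.pairwise_append] at hpw
      obtain ⟨hpw1, hpw2, hcross⟩ := hpw
      have hlt1 : ∀ k ∈ ks1, k < pvQKey (pvScan x xs).1 := fun k hk => hcross k hk _ (by simp)
      have hgt2 : ∀ k ∈ ks2, pvQKey (pvScan x xs).1 < k := fun k hk =>
        (List.pairwise_cons.mp hpw2).1 k hk
      have hminzs : ∀ a ∈ (pvScan x xs).2, pvQKey (pvScan x xs).1 ≤ pvQKey a := fun a ha =>
        pvScan_min xs x a (pvScan_snd_mem xs x a ha)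
      have hfilt : ∀ k : Int, (x :: xs).reverse.filter (fun a => pvQKey a == k)
          = (if k = pvQKey (pvScan x xs).1
             then (pvScan x xs).1 :: (pvScan x xs).2.reverse.filter (fun a => pvQKey a == k)
             else (pvScan x xs).2.reverse.filter (fun a => pvQKey a == k)) := by
        intro k
        rw [List.filter_reverse, pvScan_filter k xs x]
        split_ifs with h
        · simp [List.filter_reverse]
        · simp [List.filter_reverse]
      have hz1 : ∀ k ∈ ks1, (pvScan x xs).2.reverse.filter (fun a => pvQKey a == k) = [] := by
        intro k hk
        rw [List.filter_eq_nil_iff]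
        intro a ha
        have h1 := hminzs a (List.mem_reverse.mp ha)
        have h2 := hlt1 k hk
        simp; omega
      have hlen : (pvScan x xs).2.length = m := by rw [pvScan_len]; exact hxs
      have hrec := ih (pvScan x xs).2 ks hlen hks
        (fun a ha => hmem a (pvScan_snd_mem xs x a ha))
      rw [hlen] at hrec
      have hpass : pvPass (x :: xs).length (x :: xs)
          = (pvScan x xs).1 :: pvPass m (pvScan x xs).2 := by
        simp only [List.length_cons, hxs, pvPass]
      rw [hpass, hrec, hsplit]
      simp only [List.flatMap_append, List.flatMap_cons]
      have e1 : ks1.flatMap (fun k => (x :: xs).reverse.filter (fun a => pvQKey a == k)) = [] := by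
        rw [List.flatMap_eq_nil_iff]
        intro k hk
        rw [hfilt k, if_neg (by have := hlt1 k hk; omega)]
        exact hz1 k hk
      have e1' : ks1.flatMap (fun k => (pvScan x xs).2.reverse.filter (fun a => pvQKey a == k)) = [] := by
        rw [List.flatMap_eq_nil_iff]
        exact hz1
      have e2 : (x :: xs).reverse.filter (fun a => pvQKey a == pvQKey (pvScan x xs).1)
          = (pvScan x xs).1 :: (pvScan x xs).2.reverse.filter (fun a => pvQKey a == pvQKey (pvScan x xs).1) := by
        rw [hfilt, if_pos rfl]
      have e3 : ks2.flatMap (fun k => (x :: xs).reverse.filter (fun a => pvQKey a == k))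
          = ks2.flatMap (fun k => (pvScan x xs).2.reverse.filter (fun a => pvQKey a == k)) := by
        apply List.flatMap_congr
        intro k hk
        rw [hfilt k, if_neg (by have := hgt2 k hk; omega)]
      rw [e1, e1', e2, e3]
      simp

-- ---- generation ----

theorem momentaGen_eq (m : Int) :
    momentaGen m = (PySem.List.pyRange (-m) (m + 1) 1).flatMap (fun pz =>
      (PySem.List.pyRange (-m) (m + 1) 1).flatMap (fun py =>
        ((PySem.List.pyRange (-m) (m + 1) 1).filter (fun px => decide (px ^ 2 + py ^ 2 + pz ^ 2 ≤ m))).map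
          (fun px => [px ^ 2 + py ^ 2 + pz ^ 2, px, py, pz]))) := by
  unfold momentaGen
  simp only [PySem.List.foldl_append_ite, PySem.List.foldl_append_eq_flatMap, List.nil_append]

theorem pvFlatMap_shrink {α : Type} (a b a' b' : Int) (F : Int → List α)
    (h1 : a ≤ a') (h2 : a' ≤ b') (h3 : b' ≤ b)
    (hF : ∀ p, (a ≤ p ∧ p < a') ∨ (b' ≤ p ∧ p < b) → F p = []) :
    (PySem.List.pyRange a b 1).flatMap F = (PySem.List.pyRange a' b' 1).flatMap F := by
  rw [PySem.List.pyRange_one_append a a' b h1 (le_trans h2 h3),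
    PySem.List.pyRange_one_append a' b' b h2 h3]
  simp only [List.flatMap_append]
  have ha : (PySem.List.pyRange a a' 1).flatMap F = [] := by
    rw [List.flatMap_eq_nil_iff]
    intro p hp
    rw [PySem.List.mem_pyRange_one] at hp
    exact hF p (Or.inl ⟨hp.1, hp.2⟩)
  have hb : (PySem.List.pyRange b' b 1).flatMap F = [] := by
    rw [List.flatMap_eq_nil_iff]
    intro p hp
    rw [PySem.List.mem_pyRange_one] at hp
    exact hF p (Or.inr ⟨hp.1, hp.2⟩)
  rw [ha, hb]
  simp

theorem pvFilter_shrink (a b a' b' : Int) (p : Int → Bool)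
    (h1 : a ≤ a') (h2 : a' ≤ b') (h3 : b' ≤ b)
    (hF : ∀ x, (a ≤ x ∧ x < a') ∨ (b' ≤ x ∧ x < b) → p x = false) :
    (PySem.List.pyRange a b 1).filter p = (PySem.List.pyRange a' b' 1).filter p := by
  rw [PySem.List.pyRange_one_append a a' b h1 (le_trans h2 h3),
    PySem.List.pyRange_one_append a' b' b h2 h3]
  simp only [List.filter_append]
  have ha : (PySem.List.pyRange a a' 1).filter p = [] := by
    rw [List.filter_eq_nil_iff]
    intro x hx
    rw [PySem.List.mem_pyRange_one] at hx
    simp [hF x (Or.inl ⟨hx.1, hx.2⟩)]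
  have hb : (PySem.List.pyRange b' b 1).filter p = [] := by
    rw [List.filter_eq_nil_iff]
    intro x hx
    rw [PySem.List.mem_pyRange_one] at hx
    simp [hF x (Or.inr ⟨hx.1, hx.2⟩)]
  rw [ha, hb]
  simp

theorem pvFilter_flatMap {α β : Type} (l : List α) (g : α → List β) (p : β → Bool) :
    (l.flatMap g).filter p = l.flatMap (fun x => (g x).filter p) := by
  induction l with
  | nil => rfl
  | cons x l ih => simp [List.flatMap_cons, List.filter_append, ih]

theorem pvMap_flatMap {α β γ : Type} (l : List α) (g : α → List β) (f : β → γ) :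
    (l.flatMap g).map f = l.flatMap (fun x => (g x).map f) := by
  induction l with
  | nil => rfl
  | cons x l ih => simp [List.flatMap_cons, ih]

theorem pvFoldl_flatMap {α β σ : Type} (l : List α) (g : α → List β) (f : σ → β → σ) (init : σ) :
    (l.flatMap g).foldl f init = l.foldl (fun s x => (g x).foldl f s) init := by
  induction l generalizing init with
  | nil => rfl
  | cons x l ih => simp [List.flatMap_cons, List.foldl_append, ih]

theorem pvFlatMap_rev {α β : Type} (l : List α) (f : α → List β) :
    l.reverse.flatMap (fun x => (f x).reverse) = (l.flatMap f).reverse := by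
  induction l with
  | nil => rfl
  | cons x l ih => simp [List.flatMap_cons, List.flatMap_append, ih]

theorem pvConv (L : List Int) (m : Int) :
    L.flatMap (fun pz => L.flatMap (fun py =>
      ((L.filter (fun px => decide (px ^ 2 + py ^ 2 + pz ^ 2 ≤ m))).map
        (fun px => [px ^ 2 + py ^ 2 + pz ^ 2, px, py, pz]))))
    = pvCanon L m := by
  unfold pvCanon pvTriples
  rw [pvFilter_flatMap, pvMap_flatMap]
  apply List.flatMap_congr
  intro pz _
  rw [pvFilter_flatMap, pvMap_flatMap]
  apply List.flatMap_congr
  intro py _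
  rw [List.filter_map, List.map_map]
  rfl

theorem pvIsqrtLoop_spec (m : Int) (hm : 0 ≤ m) : ∀ (fuel : Nat) (r : Int),
    0 ≤ r → r ^ 2 ≤ m → m + 1 ≤ r + (fuel : Int) →
    0 ≤ pvIsqrtLoop m r fuel ∧ (pvIsqrtLoop m r fuel) ^ 2 ≤ m ∧ m < (pvIsqrtLoop m r fuel + 1) ^ 2 := by
  intro fuel
  induction fuel with
  | zero =>
    intro r hr hrm hfu
    exfalso
    simp only [Nat.cast_zero, add_zero] at hfu
    nlinarith [sq_nonneg (r - 1)]
  | succ f ih =>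
    intro r hr hrm hfu
    by_cases h : (r + 1) ^ 2 ≤ m
    · rw [show pvIsqrtLoop m r (f + 1) = pvIsqrtLoop m (r + 1) f by rw [pvIsqrtLoop, if_pos h]]
      exact ih (r + 1) (by omega) h (by push_cast at hfu ⊢; omega)
    · rw [show pvIsqrtLoop m r (f + 1) = r by rw [pvIsqrtLoop, if_neg h]]
      exact ⟨hr, hrm, by omega⟩

theorem pvR_spec (m : Int) (hm : 0 ≤ m) :
    0 ≤ pvR m ∧ (pvR m) ^ 2 ≤ m ∧ m < (pvR m + 1) ^ 2 := by
  have h := pvIsqrtLoop_spec m hm (m.toNat + 1) 0 le_rfl (by simpa using hm)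
    (by push_cast; omega)
  exact h

theorem pvGen_tight (m : Int) (hm : 0 ≤ m) :
    momentaGen m = pvCanon (PySem.List.pyRange (-(pvR m)) (pvR m + 1) 1) m := by
  obtain ⟨hr0, hrm, hrm2⟩ := pvR_spec m hm
  have hrlem : pvR m ≤ m := by
    have h2 : 2 * pvR m ≤ m + 1 := by nlinarith [sq_nonneg (pvR m - 1)]
    omega
  have hsq : ∀ p : Int, (-m ≤ p ∧ p < -(pvR m)) ∨ (pvR m + 1 ≤ p ∧ p < m + 1) → m < p ^ 2 := by
    intro p hp
    rcases hp with ⟨_, hp2⟩ | ⟨hp1, _⟩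
    · nlinarith
    · nlinarith
  rw [momentaGen_eq]
  rw [pvFlatMap_shrink (-m) (m + 1) (-(pvR m)) (pvR m + 1) _ (by omega) (by omega) (by omega)
    (by
      intro pz hpz
      have hp2 := hsq pz hpz
      rw [List.flatMap_eq_nil_iff]
      intro py _
      rw [List.map_eq_nil_iff, List.filter_eq_nil_iff]
      intro px _
      simp only [decide_eq_true_eq]
      push_neg
      nlinarith [sq_nonneg px, sq_nonneg py])]
  rw [show (fun pz => (PySem.List.pyRange (-m) (m + 1) 1).flatMap (fun py =>
        ((PySem.List.pyRange (-m) (m + 1) 1).filter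
          (fun px => decide (px ^ 2 + py ^ 2 + pz ^ 2 ≤ m))).map
          (fun px => [px ^ 2 + py ^ 2 + pz ^ 2, px, py, pz])))
      = (fun pz => (PySem.List.pyRange (-(pvR m)) (pvR m + 1) 1).flatMap (fun py =>
        ((PySem.List.pyRange (-(pvR m)) (pvR m + 1) 1).filter
          (fun px => decide (px ^ 2 + py ^ 2 + pz ^ 2 ≤ m))).map
          (fun px => [px ^ 2 + py ^ 2 + pz ^ 2, px, py, pz]))) from funext (fun pz => by
      rw [pvFlatMap_shrink (-m) (m + 1) (-(pvR m)) (pvR m + 1) _ (by omega) (by omega) (by omega)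
        (by
          intro py hpy
          have hp2 := hsq py hpy
          rw [List.map_eq_nil_iff, List.filter_eq_nil_iff]
          intro px _
          simp only [decide_eq_true_eq]
          push_neg
          nlinarith [sq_nonneg px, sq_nonneg pz])]
      apply List.flatMap_congr
      intro py _
      rw [pvFilter_shrink (-m) (m + 1) (-(pvR m)) (pvR m + 1) _ (by omega) (by omega) (by omega)
        (by
          intro px hpx
          have hp2 := hsq px hpx
          simp only [decide_eq_false_iff_not]
          push_neg
          nlinarith [sq_nonneg py, sq_nonneg pz])])]
  exact pvConv _ m

-- ---- B side ----

theorem pvTriples_reverse (L : List Int) :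
    pvTriples L.reverse = (pvTriples L).reverse := by
  unfold pvTriples
  rw [← pvFlatMap_rev]
  apply List.flatMap_congr
  intro pz _
  rw [← pvFlatMap_rev]
  apply List.flatMap_congr
  intro py _
  simp

theorem pvQKey_elem (t : Int × Int × Int) : pvQKey (pvElem t) = pvQ t := by
  simp [pvQKey, pvElem]

theorem pvDictStep_eq (d : PySem.Dict Int (List (List Int))) (k : Int) (v : List Int) :
    (if d.contains k then d.modify k [] (· ++ [v]) else d.insert k [v])
      = d.modify k [] (· ++ [v]) := by
  by_cases h : d.contains k
  · rw [if_pos h]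
  · rw [if_neg h]
    have h' : d.contains k = false := by simpa using h
    simp [PySem.Dict.modify, h, PySem.Dict.getD_of_not_contains, h']

theorem pvShellsFold (Lr : List Int) (m : Int) :
    Lr.foldl (fun d pz => Lr.foldl (fun d py => Lr.foldl (fun d px =>
      let qsq := px ^ 2 + py ^ 2 + pz ^ 2
      if qsq ≤ m then
        if d.contains qsq then d.modify qsq [] (· ++ [[qsq, px, py, pz]])
        else d.insert qsq [[qsq, px, py, pz]]
      else d) d) d) PySem.Dict.empty
    = ((pvTriples Lr).filter (fun t => decide (pvQ t ≤ m))).foldl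
        (fun d t => d.modify (pvQ t) [] (· ++ [pvElem t])) PySem.Dict.empty := by
  rw [← PySem.List.foldl_ite_eq_foldl_filter]
  unfold pvTriples
  simp only [pvFoldl_flatMap, List.foldl_map]
  simp only [pvDictStep_eq, pvQ, pvElem, pvMk]

theorem pvGetD_foldl_modify (T : List (Int × Int × Int)) :
    ∀ (d : PySem.Dict Int (List (List Int))) (q : Int),
    (T.foldl (fun d t => d.modify (pvQ t) [] (· ++ [pvElem t])) d).getD q []
      = d.getD q [] ++ (T.filter (fun t => pvQ t == q)).map pvElem := by
  induction T with
  | nil => intro d q; simp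
  | cons t T ih =>
    intro d q
    rw [List.foldl_cons, ih, List.filter_cons]
    by_cases h : pvQ t = q
    · subst h
      rw [if_pos (by simp), PySem.Dict.getD_modify_self]
      simp
    · rw [if_neg (by simpa using h), PySem.Dict.getD_modify_of_ne]
      exact Ne.symm h

theorem pvShellsGetD (T : List (Int × Int × Int)) (q : Int) :
    (T.foldl (fun d t => d.modify (pvQ t) [] (· ++ [pvElem t])) PySem.Dict.empty).getD q []
      = (T.filter (fun t => pvQ t == q)).map pvElem := by
  rw [pvGetD_foldl_modify]
  simp

theorem pvOutFold (shells : PySem.Dict Int (List (List Int))) (a b : Int) :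
    (PySem.List.pyRange a b 1).foldl
      (fun out q => if shells.contains q then out ++ shells.getD q [] else out) []
    = (PySem.List.pyRange a b 1).flatMap (fun q => shells.getD q []) := by
  rw [show (fun (out : List (List Int)) (q : Int) =>
        if shells.contains q then out ++ shells.getD q [] else out)
      = (fun out q => out ++ shells.getD q []) from funext fun out => funext fun q => by
    by_cases h : shells.contains q
    · rw [if_pos h]
    · have h' : shells.contains q = false := by simpa using h
      rw [if_neg h]
      simp [PySem.Dict.getD_of_not_contains, h']]
  rw [PySem.List.foldl_append_eq_flatMap]
  simp

theorem momenta_alt_eq (m : Int) (hm : 0 ≤ m) :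
    momenta_alt m = (PySem.List.pyRange 0 (m + 1) 1).flatMap
      (fun q => (pvCanon (PySem.List.pyRange (-(pvR m)) (pvR m + 1) 1) m).reverse.filter
        (fun a => pvQKey a == q)) := by
  have hL : PySem.List.pyRange (pvR m) (-(pvR m) - 1) (-1)
      = (PySem.List.pyRange (-(pvR m)) (pvR m + 1) 1).reverse := by
    rw [PySem.List.pyRange_neg_one_eq_reverse]
    norm_num
  simp only [momenta_alt, if_neg (show ¬ m < 0 by omega)]
  rw [show pvIsqrtLoop m 0 (m.toNat + 1) = pvR m from rfl, hL]
  rw [pvShellsFold, pvOutFold]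
  apply List.flatMap_congr
  intro q _
  rw [pvShellsGetD]
  unfold pvCanon
  rw [← List.map_reverse, List.filter_map, ← List.filter_reverse, ← pvTriples_reverse]
  congr 1

-- ===== VERDICT (by name: the statement is the Claim_ definition above) =====
theorem momenta_spec : Claim_equal_momenta := by
  unfold Claim_equal_momenta Spec_momenta
  intro m _
  by_cases hm : m < 0
  · have hgen : momentaGen m = [] := by
      unfold momentaGen
      rw [PySem.List.pyRange_one_eq_nil (by omega)]
      rfl
    rw [show momenta m = momentaSortPass (momentaGen m) from rfl, hgen,
      show momentaSortPass [] = [] from rfl]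
    simp only [momenta_alt, if_pos hm]
  · push_neg at hm
    have hkeys : ∀ a ∈ pvCanon (PySem.List.pyRange (-(pvR m)) (pvR m + 1) 1) m,
        pvQKey a ∈ PySem.List.pyRange 0 (m + 1) 1 := by
      intro a ha
      unfold pvCanon at ha
      obtain ⟨t, ht, rfl⟩ := List.mem_map.mp ha
      have hft := List.mem_filter.mp ht
      have hle : pvQ t ≤ m := by simpa using hft.2
      rw [pvQKey_elem, PySem.List.mem_pyRange_one]
      refine ⟨?_, by omega⟩
      unfold pvQ
      positivity
    rw [show momenta m = momentaSortPass (momentaGen m) from rfl, momentaSortPass_eq,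
      pvGen_tight m hm,
      pvPass_eq_flatMap (pvCanon (PySem.List.pyRange (-(pvR m)) (pvR m + 1) 1) m).length _
        (PySem.List.pyRange 0 (m + 1) 1) rfl (PySem.List.pairwise_lt_pyRange_one 0 (m + 1)) hkeys,
      momenta_alt_eq m hm]
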